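-- pv_equiv track=rewrite | github.com/OrezriceWasHere/NERZO | extracting_entities.py | gold_spans
-- ===== SOURCE A (Python) =====
-- from typing import List, Dict, Set, Tuple
--
-- def gold_spans(
--     tokens:     List[str],
--     ner_tags:   List[int],
--     fine_tags:  List[int],
--     fine_id2lab: List[str] | None = None
-- ) -> Tuple[List[Dict[str, str]], Set[str]]:
--     """
--     Any contiguous run of *identical* non-zero ner_tag IDs is considered one gold mention.
--     We keep:
--         1. a list of dicts     [{'text': ..., 'fine_type': ...}, ...]
--         2. a set of strings    (mention texts) for span-level precision/recall.
--     """
--     spans: List[Dict[str, str]] = []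
--     current: List[str] = []
--     cur_fine = 0
--     prev_tag = 0
--
--     def flush():
--         if current:
--             spans.append({
--                 "text": " ".join(current),
--                 "fine_type": fine_id2lab[cur_fine] if fine_id2lab else cur_fine
--             })
--
--     for word, tag, ftag in zip(tokens, ner_tags, fine_tags):
--         if tag:
--             if tag == prev_tag:
--                 current.append(word)
--             else:
--                 flush()
--                 current  = [word]
--                 cur_fine = ftag
--             prev_tag = tag
--         else:
--             flush()
--             current = []
--             prev_tag = 0
--     flush()
--
--     return spans, {d["text"] for d in spans}
-- ===== SOURCE B (Python) =====
-- from typing import List, Dict, Set, Tuple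
--
-- def gold_spans(
--     tokens:     List[str],
--     ner_tags:   List[int],
--     fine_tags:  List[int],
--     fine_id2lab: List[str] | None = None
-- ) -> Tuple[List[Dict[str, str]], Set[str]]:
--     # Two-pointer run scan: find each maximal run of equal non-zero tags directly,
--     # instead of a flush()-based state machine.
--     triples = list(zip(tokens, ner_tags, fine_tags))
--     n = len(triples)
--     spans: List[Dict[str, str]] = []
--     i = 0
--     while i < n:
--         word, tag, ftag = triples[i]
--         if tag == 0:
--             i += 1
--             continue
--         j = i + 1
--         while j < n and triples[j][1] == tag:
--             j += 1
--         spans.append({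
--             "text": " ".join(trip[0] for trip in triples[i:j]),
--             "fine_type": fine_id2lab[ftag] if fine_id2lab else ftag
--         })
--         i = j
--     return spans, {d["text"] for d in spans}
-- ===== Notes on version B (the rewrite author's own statement) =====
-- stated objective: simpler
-- what changed: Replaces the flush()-closure state machine (current/cur_fine/prev_tag mutated across iterations) with a direct two-pointer scan that finds each maximal run of equal non-zero tags and emits its span in one place.
import Mathlib
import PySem

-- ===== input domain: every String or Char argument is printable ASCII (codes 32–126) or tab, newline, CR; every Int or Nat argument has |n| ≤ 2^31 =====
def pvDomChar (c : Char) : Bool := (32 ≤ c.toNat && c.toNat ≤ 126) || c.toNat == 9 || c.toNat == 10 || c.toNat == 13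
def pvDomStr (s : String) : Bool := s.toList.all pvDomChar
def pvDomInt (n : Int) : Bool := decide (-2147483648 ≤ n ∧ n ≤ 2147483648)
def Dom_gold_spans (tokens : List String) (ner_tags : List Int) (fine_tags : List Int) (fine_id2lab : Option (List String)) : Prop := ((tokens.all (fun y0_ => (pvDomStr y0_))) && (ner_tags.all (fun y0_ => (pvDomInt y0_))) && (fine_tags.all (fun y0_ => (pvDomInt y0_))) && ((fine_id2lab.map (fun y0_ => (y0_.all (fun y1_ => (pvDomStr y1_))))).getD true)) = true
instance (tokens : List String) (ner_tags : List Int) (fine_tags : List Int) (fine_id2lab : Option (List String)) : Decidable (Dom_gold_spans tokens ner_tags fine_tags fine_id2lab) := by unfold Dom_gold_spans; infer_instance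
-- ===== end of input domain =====

-- B replaces A's flush()-based state machine by a direct two-pointer maximal-run scan; objective: simpler.
-- Equivalence is about the return value; neither version mutates its arguments.

-- `fine_id2lab[cur_fine] if fine_id2lab else cur_fine`: exact on Pre_ (fine_id2lab a non-empty
-- list and the index in Python range); outside Pre_ Python raises IndexError or returns an int.
-- Shared by both ports because both Pythons contain this identical expression.
def pvLabel (fine_id2lab : Option (List String)) (cf : Int) : String :=
  match fine_id2lab with
  | some l => if l.isEmpty then PySem.Int.toStr cf else (PySem.List.pyGet? l cf).getD ""
  | none => PySem.Int.toStr cf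

-- the dict {"text": " ".join(ws), "fine_type": …}
def pvMkSpan (fine_id2lab : Option (List String)) (ws : List String) (cf : Int) : List (String × String) :=
  [("text", PySem.Str.join " " ws), ("fine_type", pvLabel fine_id2lab cf)]

-- d["text"]: first-match association-list lookup (key always present in the spans built here)
def pvGetStr (d : List (String × String)) (k : String) : String :=
  match d with
  | [] => ""
  | (k', v) :: r => if k' == k then v else pvGetStr r k

-- {d["text"] for d in spans} (identical comprehension in both Pythons)
def pvTexts (spans : List (List (String × String))) : List String :=
  PySem.Set.ofList (spans.map (fun d => pvGetStr d "text"))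

-- ===== PORT A =====
def pvFlushA (fine_id2lab : Option (List String)) (spans : List (List (String × String)))
    (current : List String) (cf : Int) : List (List (String × String)) :=
  if current.isEmpty then spans else spans ++ [pvMkSpan fine_id2lab current cf]

-- loop body: state (spans, current, cur_fine, prev_tag)
def pvStepA (fine_id2lab : Option (List String))
    (st : List (List (String × String)) × List String × Int × Int)
    (trip : String × Int × Int) : List (List (String × String)) × List String × Int × Int :=
  let (spans, current, cf, prev) := st
  let (w, t, f) := trip
  if t ≠ 0 then
    if t = prev then (spans, current ++ [w], cf, prev)
    else (pvFlushA fine_id2lab spans current cf, [w], f, t)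
  else (pvFlushA fine_id2lab spans current cf, [], cf, 0)

def gold_spans (tokens : List String) (ner_tags : List Int) (fine_tags : List Int) (fine_id2lab : Option (List String)) : (List (List (String × String))) × List String :=
  let st := (tokens.zip (ner_tags.zip fine_tags)).foldl (pvStepA fine_id2lab) ([], [], 0, 0)
  let spans := pvFlushA fine_id2lab st.1 st.2.1 st.2.2.1
  (spans, pvTexts spans)

-- ===== PORT B =====
-- outer while: skip zero tags; inner `while j < n and triples[j][1] == tag` = takeWhile/dropWhile
def pvBGo (fine_id2lab : Option (List String)) : List (String × Int × Int) → List (List (String × String))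
  | [] => []
  | (w, t, f) :: z =>
    if t = 0 then pvBGo fine_id2lab z
    else pvMkSpan fine_id2lab (w :: (z.takeWhile (fun p => p.2.1 == t)).map (·.1)) f
           :: pvBGo fine_id2lab (z.dropWhile (fun p => p.2.1 == t))
termination_by z => z.length
decreasing_by
  · exact Nat.lt_succ_of_le (Nat.le_refl _)
  · exact Nat.lt_succ_of_le (z.length_dropWhile_le _)

def gold_spans_alt (tokens : List String) (ner_tags : List Int) (fine_tags : List Int) (fine_id2lab : Option (List String)) : (List (List (String × String))) × List String :=
  let spans := pvBGo fine_id2lab (tokens.zip (ner_tags.zip fine_tags))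
  (spans, pvTexts spans)

-- ===== PRECONDITION & SPEC =====
-- at every position that starts a run of identical non-zero tags, the fine tag must be a
-- valid Python index into the label list (these are exactly the indices A evaluates)
def pvRunStartsOk (len : Nat) : Int → List (String × Int × Int) → Bool
  | _, [] => true
  | prev, (_, t, f) :: z =>
    (t == 0 || t == prev || decide (PySem.Raise.InRange len f)) && pvRunStartsOk len t z

def pvPreB (tokens : List String) (ner_tags : List Int) (fine_tags : List Int) (fine_id2lab : Option (List String)) : Bool :=
  match fine_id2lab with
  | some l => if l.isEmpty then (tokens.zip (ner_tags.zip fine_tags)).all (fun p => p.2.1 == 0)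
              else pvRunStartsOk l.length 0 (tokens.zip (ner_tags.zip fine_tags))
  | none => (tokens.zip (ner_tags.zip fine_tags)).all (fun p => p.2.1 == 0)

-- Pre_ excludes (a) inputs where a run-start fine tag is out of Python range for fine_id2lab, on
-- which A raises IndexError, and (b) inputs where fine_id2lab is falsy (None or []) yet a non-zero
-- tag occurs, on which A's "fine_type" is an int and the result leaves the declared str->str type.
def Pre_gold_spans (tokens : List String) (ner_tags : List Int) (fine_tags : List Int) (fine_id2lab : Option (List String)) : Prop :=
  pvPreB tokens ner_tags fine_tags fine_id2lab = true
instance (tokens : List String) (ner_tags : List Int) (fine_tags : List Int) (fine_id2lab : Option (List String)) : Decidable (Pre_gold_spans tokens ner_tags fine_tags fine_id2lab) := by unfold Pre_gold_spans; infer_instance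

def pvWitness_gold_spans : List String × List Int × List Int × Option (List String) :=
  (["Barack", "Obama", "spoke"], [1, 1, 0], [2, 2, 0], some ["O", "LOC", "PER"])

def Spec_gold_spans (tokens : List String) (ner_tags : List Int) (fine_tags : List Int) (fine_id2lab : Option (List String)) (out : (List (List (String × String))) × List String) : Prop := out = gold_spans_alt tokens ner_tags fine_tags fine_id2lab
instance (tokens : List String) (ner_tags : List Int) (fine_tags : List Int) (fine_id2lab : Option (List String)) (out : (List (List (String × String))) × List String) : Decidable (Spec_gold_spans tokens ner_tags fine_tags fine_id2lab out) := by unfold Spec_gold_spans; infer_instance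

-- ===== CLAIM (what is proved, stated in full; the proofs are below) =====
def Claim_equal_gold_spans : Prop := ∀ (tokens : List String) (ner_tags : List Int) (fine_tags : List Int) (fine_id2lab : Option (List String)), Dom_gold_spans tokens ner_tags fine_tags fine_id2lab → Pre_gold_spans tokens ner_tags fine_tags fine_id2lab → Spec_gold_spans tokens ner_tags fine_tags fine_id2lab (gold_spans tokens ner_tags fine_tags fine_id2lab)

-- ===== LEMMAS AND PROOFS =====

-- finishing step of A: final flush applied to the loop's end state
def pvFinishA (fine_id2lab : Option (List String))
    (st : List (List (String × String)) × List String × Int × Int) : List (List (String × String)) :=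
  pvFlushA fine_id2lab st.1 st.2.1 st.2.2.1

-- the loop invariant: A's machine, started in either reachable state shape, produces
-- its accumulated spans followed by what B's run scan produces on the remaining input
theorem pvKey (lab : Option (List String)) (z : List (String × Int × Int)) :
    (∀ spans cf, pvFinishA lab (z.foldl (pvStepA lab) (spans, [], cf, 0)) = spans ++ pvBGo lab z)
    ∧ (∀ spans cur cf prev, prev ≠ 0 → cur ≠ [] →
        pvFinishA lab (z.foldl (pvStepA lab) (spans, cur, cf, prev)) =
          spans ++ pvMkSpan lab (cur ++ (z.takeWhile (fun p => p.2.1 == prev)).map (·.1)) cf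
                :: pvBGo lab (z.dropWhile (fun p => p.2.1 == prev))) := by
  induction z with
  | nil =>
    constructor
    · intro spans cf
      simp [pvFinishA, pvFlushA, pvBGo]
    · intro spans cur cf prev _ hcur
      simp [pvFinishA, pvFlushA, pvBGo, List.isEmpty_iff, hcur]
  | cons hd tl ih =>
    obtain ⟨w, t, f⟩ := hd
    obtain ⟨ih1, ih2⟩ := ih
    constructor
    · intro spans cf
      by_cases ht : t = 0
      · subst ht
        have hstep : pvStepA lab (spans, [], cf, 0) (w, 0, f) = (spans, [], cf, 0) := by
          simp [pvStepA, pvFlushA]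
        rw [List.foldl_cons, hstep, ih1 spans cf]
        simp [pvBGo]
      · have hstep : pvStepA lab (spans, [], cf, 0) (w, t, f) = (spans, [w], f, t) := by
          simp [pvStepA, pvFlushA, ht]
        rw [List.foldl_cons, hstep, ih2 spans [w] f t ht (by simp)]
        simp [pvBGo, ht]
    · intro spans cur cf prev hprev hcur
      by_cases ht : t = 0
      · subst ht
        have hstep : pvStepA lab (spans, cur, cf, prev) (w, 0, f) =
            (spans ++ [pvMkSpan lab cur cf], [], cf, 0) := by
          simp [pvStepA, pvFlushA, List.isEmpty_iff, hcur]
        rw [List.foldl_cons, hstep, ih1 (spans ++ [pvMkSpan lab cur cf]) cf]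
        have h0 : ((0 : Int) == prev) = false := by simp [Ne.symm hprev]
        simp [pvBGo, h0]
      · by_cases hp : t = prev
        · subst hp
          have hstep : pvStepA lab (spans, cur, cf, t) (w, t, f) = (spans, cur ++ [w], cf, t) := by
            simp [pvStepA, ht]
          rw [List.foldl_cons, hstep, ih2 spans (cur ++ [w]) cf t ht (by simp)]
          simp
        · have hstep : pvStepA lab (spans, cur, cf, prev) (w, t, f) =
              (spans ++ [pvMkSpan lab cur cf], [w], f, t) := by
            simp [pvStepA, pvFlushA, List.isEmpty_iff, hcur, ht, hp]
          rw [List.foldl_cons, hstep, ih2 (spans ++ [pvMkSpan lab cur cf]) [w] f t ht (by simp)]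
          have hp' : (t == prev) = false := by simp [hp]
          simp [pvBGo, ht, hp']

-- ===== VERDICT (by name: the statement is the Claim_ definition above) =====
theorem gold_spans_spec : Claim_equal_gold_spans := by
  intro tokens ner_tags fine_tags fine_id2lab _ _
  unfold Spec_gold_spans gold_spans gold_spans_alt
  have h := (pvKey fine_id2lab (tokens.zip (ner_tags.zip fine_tags))).1 [] 0
  simp only [pvFinishA] at h
  simp [h]
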